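-- pv_equiv track=rewrite | github.com/iandioch/solutions | kattis/methodicmultiplication/solution.py | emit_peano
-- ===== SOURCE A (Python) =====
-- def emit_peano(n):
--     if n == 0:
--         return '0'
--     s = []
--     for i in range(n):
--         s.append('S(')
--     s.append('0')
--     for i in range(n):
--         s.append(')')
--     return ''.join(s)
-- ===== SOURCE B (Python) =====
-- def emit_peano(n):
--     k = max(n, 0)
--     return 'S(' * k + '0' + ')' * k
-- ===== Notes on version B (the rewrite author's own statement) =====
-- stated objective: faster
-- what changed: Replaces the two explicit range loops, list accumulator and join with a closed-form string-repetition expression 'S(' * max(n,0) + '0' + ')' * max(n,0), done by the interpreter's C-level repeat instead of per-element Python loop iterations.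
import Mathlib
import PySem

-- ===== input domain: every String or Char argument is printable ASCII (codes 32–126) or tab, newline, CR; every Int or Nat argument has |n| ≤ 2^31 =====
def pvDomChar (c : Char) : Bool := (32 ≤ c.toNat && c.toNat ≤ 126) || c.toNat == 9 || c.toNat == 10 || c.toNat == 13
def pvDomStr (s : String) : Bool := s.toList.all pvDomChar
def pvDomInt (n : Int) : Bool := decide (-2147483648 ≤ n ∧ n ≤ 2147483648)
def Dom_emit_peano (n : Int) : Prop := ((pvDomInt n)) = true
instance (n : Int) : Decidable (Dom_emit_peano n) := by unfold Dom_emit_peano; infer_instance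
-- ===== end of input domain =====

-- ===== PORT A =====
-- A: two explicit range loops appending 'S(' and ')' around '0' into a list, then ''.join.
def emit_peano (n : Int) : String :=
  if n == 0 then "0"
  else
    let s : List (List Char) := (PySem.List.pyRange 0 n 1).foldl (fun acc _ => acc ++ ["S(".toList]) []
    let s := s ++ ["0".toList]
    let s := (PySem.List.pyRange 0 n 1).foldl (fun acc _ => acc ++ [")".toList]) s
    String.ofList s.flatten

-- ===== PORT B =====
-- B: closed-form string repetition 'S(' * k + '0' + ')' * k with k = max(n, 0) — no loops, no list, no join.
-- 'S(' * k (Python string repetition) is ported as flattening k copies of the char list.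
def pyStrMul (cs : List Char) (k : Nat) : List Char := (List.replicate k cs).flatten

def emit_peano_alt (n : Int) : String :=
  let k := (max n 0).toNat
  String.ofList (pyStrMul "S(".toList k ++ "0".toList ++ pyStrMul ")".toList k)

-- ===== PRECONDITION & SPEC =====
def Spec_emit_peano (n : Int) (out : String) : Prop := out = emit_peano_alt n
instance (n : Int) (out : String) : Decidable (Spec_emit_peano n out) := by unfold Spec_emit_peano; infer_instance

-- ===== CLAIM (what is proved, stated in full; the proofs are below) =====
def Claim_equal_emit_peano : Prop := ∀ (n : Int), Dom_emit_peano n → Spec_emit_peano n (emit_peano n)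

-- ===== LEMMAS AND PROOFS =====

-- A's loop folds: each range loop appends the same chunk once per element.
theorem emit_peano_loops (n : Int) :
    ((PySem.List.pyRange 0 n 1).foldl (fun acc (_ : Int) => acc ++ ["S(".toList]) [] ++ ["0".toList]
      |> (PySem.List.pyRange 0 n 1).foldl (fun acc (_ : Int) => acc ++ [")".toList]))
    = List.replicate n.toNat "S(".toList ++ ["0".toList] ++ List.replicate n.toNat ")".toList := by
  simp only [PySem.List.foldl_append_singleton_eq_map, List.map_const',
    PySem.List.length_pyRange_one, Int.sub_zero, List.nil_append, List.append_assoc]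

-- ===== VERDICT (by name: the statement is the Claim_ definition above) =====
theorem emit_peano_spec : Claim_equal_emit_peano := by
  intro n _
  unfold Spec_emit_peano emit_peano emit_peano_alt pyStrMul
  by_cases h : n = 0
  · subst h; rfl
  · simp only [beq_iff_eq, h, if_false]
    have := emit_peano_loops n
    -- (loop-shape lemma above)
    rw [show (max n 0).toNat = n.toNat by omega]
    rw [this]
    simp [List.flatten_append]
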